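-- pv_equiv track=rewrite | github.com/IulianMurariu-Tanasache/Server-MQTT | Server.py | checkTopicFilter
-- ===== SOURCE A (Python) =====
-- def checkTopicFilter(topics):
--     # $ nu e implementat
--     for t in topics:
--         next = t
--         level = t
--         while next.find('/') != -1:
--             level = str(next[0:next.find('/')])
--             next = str(next[next.find('/') + 1:])
--             if level == '' or level == '#' or any(x in ['#', '+'] for x in level):
--                 return False
--     return True
-- ===== SOURCE B (Python) =====
-- def checkTopicFilter(topics):
--     for t in topics:
--         for level in t.split('/')[:-1]:
--             if level == '' or '#' in level or '+' in level:
--                 return False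
--     return True
-- ===== Notes on version B (the rewrite author's own statement) =====
-- stated objective: simpler
-- what changed: replaces the while-loop that repeatedly calls find('/') and re-slices the remaining string with a single split('/') followed by a scan of all but the last segment
import Mathlib
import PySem

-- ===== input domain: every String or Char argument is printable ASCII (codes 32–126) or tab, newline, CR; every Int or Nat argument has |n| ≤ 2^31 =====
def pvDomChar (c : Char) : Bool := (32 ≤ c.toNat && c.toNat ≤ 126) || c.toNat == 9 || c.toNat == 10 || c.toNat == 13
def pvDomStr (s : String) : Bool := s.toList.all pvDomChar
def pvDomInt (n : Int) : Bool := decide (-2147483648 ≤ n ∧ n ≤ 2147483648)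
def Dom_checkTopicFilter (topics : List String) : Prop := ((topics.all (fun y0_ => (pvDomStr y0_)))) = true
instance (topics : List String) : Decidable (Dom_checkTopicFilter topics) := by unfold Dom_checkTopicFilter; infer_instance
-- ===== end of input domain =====

-- B replaces A's repeated find('/')-and-reslice while-loop with one split('/') and a
-- scan of all but the last segment (objective: simpler).
-- Strings are handled as code-point lists (List Char) via PySem.Chars; exact on the ASCII domain.

-- ===== PORT A =====
-- the body of A's `while next.find('/') != -1:` loop, per topic (next : List Char)
def checkTopicLoopA (next : List Char) : Bool :=
  if h : PySem.Chars.find next ['/'] ≠ -1 then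
    -- level = str(next[0:next.find('/')])
    let level := PySem.List.slice next (some 0) (some (PySem.Chars.find next ['/']))
    -- next = str(next[next.find('/') + 1:])
    let next' := PySem.List.slice next (some (PySem.Chars.find next ['/'] + 1)) none
    -- if level == '' or level == '#' or any(x in ['#', '+'] for x in level): return False
    if level == ([] : List Char) || level == ['#'] || level.any (fun x => x == '#' || x == '+') then
      false
    else
      checkTopicLoopA next'
  else
    true
termination_by next.length
decreasing_by
  · have h0 : (0 : Int) ≤ PySem.Chars.find next ['/'] := by
      have := PySem.Chars.neg_one_le_find next ['/']
      omega
    have hpre := (PySem.Chars.find_spec h0).1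
    have hlt : (PySem.Chars.find next ['/']).toNat < next.length := by
      rcases hpre with ⟨t, ht⟩
      have : (next.drop (PySem.Chars.find next ['/']).toNat).length = 1 + t.length := by
        rw [← ht]; simp [Nat.add_comm]
      simp at this
      omega
    have hfrom : PySem.List.slice next (some (PySem.Chars.find next ['/'] + 1)) none
        = next.drop (PySem.Chars.find next ['/'] + 1).toNat :=
      PySem.List.slice_from next (by omega)
    simp [hfrom]
    omega

def checkTopicFilter (topics : List String) : Bool :=
  -- for t in topics: … ; return True
  match topics with
  | [] => true
  | t :: rest =>
    if checkTopicLoopA t.toList then checkTopicFilter rest else false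

-- ===== PORT B =====
-- if level == '' or '#' in level or '+' in level
def badLevelB (level : List Char) : Bool :=
  level == ([] : List Char) || PySem.Chars.isIn ['#'] level || PySem.Chars.isIn ['+'] level

def checkTopicFilter_alt (topics : List String) : Bool :=
  -- for t in topics: for level in t.split('/')[:-1]: if bad: return False ; return True
  topics.all (fun t =>
    (PySem.List.slice (PySem.Chars.splitOn t.toList ['/']) none (some (-1))).all
      (fun level => !badLevelB level))

-- ===== PRECONDITION & SPEC =====
def Spec_checkTopicFilter (topics : List String) (out : Bool) : Prop := out = checkTopicFilter_alt topics
instance (topics : List String) (out : Bool) : Decidable (Spec_checkTopicFilter topics out) := by unfold Spec_checkTopicFilter; infer_instance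

-- ===== CLAIM (what is proved, stated in full; the proofs are below) =====
def Claim_equal_checkTopicFilter : Prop := ∀ (topics : List String), Dom_checkTopicFilter topics → Spec_checkTopicFilter topics (checkTopicFilter topics)

-- ===== LEMMAS AND PROOFS =====

-- structural model of s.split('/') on char lists
def pySplitSlash : List Char → List (List Char)
  | [] => [[]]
  | c :: rest =>
    if c = '/' then [] :: pySplitSlash rest
    else
      match pySplitSlash rest with
      | s :: ss => (c :: s) :: ss
      | [] => [[c]]

def consHead (x : List Char) : List (List Char) → List (List Char)
  | s :: ss => (x ++ s) :: ss
  | [] => [x]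

theorem pySplitSlash_ne_nil (cs : List Char) : pySplitSlash cs ≠ [] := by
  induction cs with
  | nil => simp [pySplitSlash]
  | cons c rest ih =>
    simp only [pySplitSlash]
    split
    · simp
    · cases h : pySplitSlash rest with
      | nil => simp
      | cons s ss => simp

theorem consHead_nil_of_ne (ls : List (List Char)) (h : ls ≠ []) : consHead [] ls = ls := by
  cases ls with
  | nil => exact absurd rfl h
  | cons s ss => simp [consHead]

theorem splitOn_go_spec (fuel : Nat) (l cur : List Char) (acc : List (List Char))
    (h : l.length < fuel) :
    PySem.Chars.splitOn.go ['/'] fuel l cur acc = acc.reverse ++ consHead cur.reverse (pySplitSlash l) := by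
  induction fuel generalizing l cur acc with
  | zero => omega
  | succ fuel ih =>
    cases l with
    | nil =>
      simp [PySem.Chars.splitOn.go, pySplitSlash, consHead]
    | cons c rest =>
      by_cases hc : c = '/'
      · subst hc
        have hpref : List.isPrefixOf ['/'] ('/' :: rest) = true := by
          simp [List.isPrefixOf]
        rw [PySem.Chars.splitOn.go]
        simp only [hpref, if_true]
        have hrec := ih rest [] ((cur.reverse) :: acc) (by simp at h ⊢; omega)
        simp only [List.length_cons, List.length_nil, List.drop_succ_cons,
          List.drop_zero] at hrec ⊢
        rw [hrec]
        simp only [pySplitSlash, consHead, List.reverse_nil, List.reverse_cons,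
          List.append_assoc, List.singleton_append, List.nil_append]
        cases hs : pySplitSlash rest with
        | nil => exact absurd hs (pySplitSlash_ne_nil rest)
        | cons s ss => simp
      · have hpref : List.isPrefixOf ['/'] (c :: rest) = false := by
          simp [List.isPrefixOf]
          exact fun h' => hc h'.symm
        rw [PySem.Chars.splitOn.go]
        simp only [hpref, Bool.false_eq_true, if_false]
        have hrec := ih rest (c :: cur) acc (by simp at h ⊢; omega)
        rw [hrec]
        simp only [pySplitSlash, if_neg hc]
        cases hs : pySplitSlash rest with
        | nil => exact absurd hs (pySplitSlash_ne_nil rest)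
        | cons s ss => simp [consHead]

theorem splitOn_slash (cs : List Char) :
    PySem.Chars.splitOn cs ['/'] = pySplitSlash cs := by
  unfold PySem.Chars.splitOn
  rw [splitOn_go_spec _ _ _ _ (by omega)]
  simp [consHead_nil_of_ne _ (pySplitSlash_ne_nil cs)]

theorem pySplitSlash_no_slash (cs : List Char) (h : '/' ∉ cs) : pySplitSlash cs = [cs] := by
  induction cs with
  | nil => rfl
  | cons c rest ih =>
    simp at h
    simp only [pySplitSlash, if_neg (fun hh : c = '/' => h.1 hh.symm)]
    rw [ih h.2]

theorem pySplitSlash_append (a b : List Char) (h : '/' ∉ a) :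
    pySplitSlash (a ++ '/' :: b) = a :: pySplitSlash b := by
  induction a with
  | nil => simp [pySplitSlash]
  | cons c rest ih =>
    simp at h
    simp only [List.cons_append, pySplitSlash]
    rw [ih h.2, if_neg (fun hh : c = '/' => h.1 hh.symm)]

theorem singleton_infix_iff_mem (a : Char) (l : List Char) : [a] <:+: l ↔ a ∈ l := by
  constructor
  · intro h
    exact (List.singleton_sublist).mp h.sublist
  · intro h
    obtain ⟨s, t, hst⟩ := List.append_of_mem h
    exact ⟨s, t, by simp [hst]⟩

theorem singleton_prefix_iff (a : Char) (l : List Char) : [a] <+: l ↔ l.head? = some a := by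
  cases l with
  | nil => simp
  | cons c rest =>
    constructor
    · rintro ⟨t, ht⟩
      simp at ht
      simp [ht.1]
    · intro h
      simp at h
      exact ⟨rest, by simp [h]⟩

-- A's per-level test equals B's per-level test
theorem bad_cond_eq (lv : List Char) :
    (lv == ([] : List Char) || lv == ['#'] || lv.any (fun x => x == '#' || x == '+'))
      = badLevelB lv := by
  rw [Bool.eq_iff_iff]
  simp only [badLevelB, Bool.or_eq_true, beq_iff_eq, List.any_eq_true,
    PySem.Chars.isIn_iff_infix, singleton_infix_iff_mem]
  constructor
  · rintro ((h | h) | ⟨x, hx, h | h⟩)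
    · exact Or.inl (Or.inl h)
    · exact Or.inl (Or.inr (by rw [h]; simp))
    · subst h; exact Or.inl (Or.inr hx)
    · subst h; exact Or.inr hx
  · rintro ((h | h) | h)
    · exact Or.inl (Or.inl h)
    · exact Or.inr ⟨'#', h, by simp⟩
    · exact Or.inr ⟨'+', h, by simp⟩

-- the core correspondence: A's while-loop over one topic = B's scan of all but the last segment
theorem checkTopicLoopA_eq (cs : List Char) :
    checkTopicLoopA cs = ((pySplitSlash cs).dropLast).all (fun lv => !badLevelB lv) := by
  induction hn : cs.length using Nat.strong_induction_on generalizing cs with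
  | _ n ih =>
  by_cases h : PySem.Chars.find cs ['/'] ≠ -1
  · have h0 : (0 : Int) ≤ PySem.Chars.find cs ['/'] := by
      have := PySem.Chars.neg_one_le_find cs ['/']
      omega
    set i : Nat := (PySem.Chars.find cs ['/']).toNat with hi
    obtain ⟨hpre, hmin⟩ := PySem.Chars.find_spec h0
    have hlt : i < cs.length := by
      rcases hpre with ⟨t, ht⟩
      have : (cs.drop i).length = 1 + t.length := by rw [← ht]; simp [Nat.add_comm]
      simp at this
      omega
    have hdrop : cs.drop i = '/' :: cs.drop (i + 1) := by
      rcases hpre with ⟨t, ht⟩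
      have h1 : cs.drop i = '/' :: t := by simpa using ht.symm
      have h2 : cs.drop (i + 1) = t := by
        rw [← List.drop_drop, h1]
        simp
      rw [h1, h2]
    have hcs : cs = cs.take i ++ '/' :: cs.drop (i + 1) := by
      conv_lhs => rw [← List.take_append_drop i cs]
      rw [hdrop]
    have hnoslash : '/' ∉ cs.take i := by
      intro hmem
      obtain ⟨j, hj, hget⟩ := List.getElem_of_mem hmem
      have hjlt : j < i := by simp at hj; exact hj.1
      apply hmin j hjlt
      rw [singleton_prefix_iff]
      rw [List.head?_drop]
      rw [List.getElem?_eq_getElem (by omega)]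
      have : cs[j] = (cs.take i)[j] := by
        rw [List.getElem_take]
      rw [this, hget]
    -- unfold one step of A
    rw [checkTopicLoopA, dif_pos h]
    have hslice0 : PySem.List.slice cs (some 0) (some (PySem.Chars.find cs ['/'])) = cs.take i := by
      rw [PySem.List.slice_zero_start, PySem.List.slice_to cs h0]
    have hslice1 : PySem.List.slice cs (some (PySem.Chars.find cs ['/'] + 1)) none = cs.drop (i + 1) := by
      rw [PySem.List.slice_from cs (by omega)]
      congr 1
      omega
    rw [hslice0, hslice1]
    -- unfold one step of B's split
    have hsplit : pySplitSlash cs = cs.take i :: pySplitSlash (cs.drop (i + 1)) := by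
      conv_lhs => rw [hcs]
      exact pySplitSlash_append _ _ hnoslash
    rw [hsplit, List.dropLast_cons_of_ne_nil (pySplitSlash_ne_nil _), List.all_cons]
    simp only [bad_cond_eq]
    by_cases hb : badLevelB (cs.take i) = true
    · simp [hb]
    · simp only [Bool.not_eq_true] at hb
      rw [hb]
      simp only [Bool.not_false, Bool.true_and, if_false, Bool.false_eq_true]
      exact ih (cs.drop (i + 1)).length (by simp; omega) _ rfl
  · rw [checkTopicLoopA, dif_neg h]
    have : ¬ ['/'] <:+: cs := by
      rw [← PySem.Chars.find_eq_neg_one_iff]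
      simpa using h
    rw [singleton_infix_iff_mem] at this
    rw [pySplitSlash_no_slash cs this]
    simp

theorem checkTopicFilter_eq_alt (topics : List String) :
    checkTopicFilter topics = checkTopicFilter_alt topics := by
  induction topics with
  | nil => rfl
  | cons t rest ih =>
    rw [checkTopicFilter, checkTopicFilter_alt, List.all_cons]
    rw [checkTopicLoopA_eq, ← splitOn_slash, ← PySem.List.slice_to_neg_one]
    by_cases hb : (PySem.List.slice (PySem.Chars.splitOn t.toList ['/']) none (some (-1))).all
        (fun lv => !badLevelB lv) = true
    · rw [hb, if_pos rfl, ih]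
      rfl
    · simp only [Bool.not_eq_true] at hb
      rw [hb]
      simp

-- ===== VERDICT (by name: the statement is the Claim_ definition above) =====
theorem checkTopicFilter_spec : Claim_equal_checkTopicFilter := by
  intro topics _
  exact checkTopicFilter_eq_alt topics
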